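-- pv_equiv track=rewrite | github.com/stallmanifold/codewars | python/src/codewars/kyu3/base64_encoding.py | to_base64_iter
-- ===== SOURCE A (Python) =====
-- def to_base64_iter(buf):
--     rem_shift   = { 0: 4, 2: 2, 4: 0 }
--     rem_mask    = { 0: 0x03, 2: 0x0F, 4: 0x3F }
--     sextet_mask = { 0: 0xFC, 2: 0xF0, 4: 0xC0 }
--     buf_size = len(buf)
--
--     bits_in_rem = 0
--     rem = 0
--     sextet = 0
--     i = 0
--     while True:
--         if (i < buf_size) and (bits_in_rem < 6):
--             sextet = ((buf[i] & sextet_mask[bits_in_rem]) >> (bits_in_rem + 2)) | rem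
--             rem = (buf[i] & rem_mask[bits_in_rem]) << rem_shift[bits_in_rem]
--             bits_in_rem += 2
--             i += 1
--         elif (i < buf_size) and (bits_in_rem >= 6):
--             sextet = rem
--             rem = 0
--             bits_in_rem = 0
--         elif (i >= buf_size) and (bits_in_rem > 0):
--             # We have run out of bytes, but we have not processed
--             # all of the sextets yet.
--             sextet = rem
--             rem = 0
--             bits_in_rem = 0
--         else:
--             # We are out of bytes, and there are no more sextet chunks
--             # remaining.
--             break
--
--         assert (sextet & 0xC0) == 0
--         yield sextet
-- ===== SOURCE B (Python) =====
-- def to_base64_iter(buf):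
--     acc = 0
--     nbits = 0
--     for byte in buf:
--         acc = ((acc & 0xFF) << 8) | (byte & 0xFF)
--         nbits += 8
--         while nbits >= 6:
--             nbits -= 6
--             yield (acc >> nbits) & 0x3F
--     if nbits > 0:
--         yield (acc << (6 - nbits)) & 0x3F
-- ===== Notes on version B (the rewrite author's own statement) =====
-- stated objective: simpler
-- what changed: Replaces A's four-way state machine over (i, bits_in_rem, rem) with per-remainder mask/shift lookup tables by a plain bit-accumulator generator: shift each byte into a bounded 16-bit accumulator and drain 6-bit groups, with one final left-padded flush.
import Mathlib
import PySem

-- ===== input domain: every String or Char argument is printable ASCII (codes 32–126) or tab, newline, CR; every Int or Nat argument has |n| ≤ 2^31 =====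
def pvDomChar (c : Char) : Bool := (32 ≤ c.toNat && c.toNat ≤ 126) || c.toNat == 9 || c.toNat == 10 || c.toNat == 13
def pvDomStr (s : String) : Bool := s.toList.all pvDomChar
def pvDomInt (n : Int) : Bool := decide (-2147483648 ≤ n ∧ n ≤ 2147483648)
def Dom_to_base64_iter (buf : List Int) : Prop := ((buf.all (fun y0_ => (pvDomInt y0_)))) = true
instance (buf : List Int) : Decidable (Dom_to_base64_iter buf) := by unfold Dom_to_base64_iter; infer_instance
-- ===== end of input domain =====

-- B replaces A's four-way state machine with mask/shift lookup tables by a plain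
-- bit-accumulator loop that drains 6-bit groups (objective: simpler).


-- ===== PORT A =====
-- Python dict constants of A (keys are always in {0,2,4} when accessed; the
-- guarded lookups are ported with Dict.getD, exact on all reachable states).
def pvRemShift : PySem.Dict Int Int := PySem.Dict.ofList [(0, 4), (2, 2), (4, 0)]
def pvRemMask : PySem.Dict Int Int := PySem.Dict.ofList [(0, 0x03), (2, 0x0F), (4, 0x3F)]
def pvSextetMask : PySem.Dict Int Int := PySem.Dict.ofList [(0, 0xFC), (2, 0xF0), (4, 0xC0)]

-- A's `while True` loop; `yield`ed sextets are collected in `out`.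
-- (the shift amounts are nonnegative on every reachable state, so .toNat is exact)
def pvLoopA (buf : List Int) (bits_in_rem rem i : Int) (out : List Int) : List Int :=
  if i < PySem.List.len buf ∧ bits_in_rem < 6 then
    pvLoopA buf (bits_in_rem + 2)
      ((PySem.Int.band (PySem.List.pyGetD buf i 0) (PySem.Dict.getD pvRemMask bits_in_rem 0)) <<<
        (PySem.Dict.getD pvRemShift bits_in_rem 0).toNat)
      (i + 1)
      (out ++ [PySem.Int.bor
        ((PySem.Int.band (PySem.List.pyGetD buf i 0) (PySem.Dict.getD pvSextetMask bits_in_rem 0)) >>>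
          (bits_in_rem + 2).toNat) rem])
  else if i < PySem.List.len buf ∧ 6 ≤ bits_in_rem then
    pvLoopA buf 0 0 i (out ++ [rem])
  else if PySem.List.len buf ≤ i ∧ 0 < bits_in_rem then
    pvLoopA buf 0 0 i (out ++ [rem])
  else out
termination_by (4 * (PySem.List.len buf - i)).toNat +
  (if 6 ≤ bits_in_rem then 1 else 0) +
  (if PySem.List.len buf ≤ i ∧ 0 < bits_in_rem then 1 else 0)
decreasing_by
  · simp only [PySem.List.len] at *
    split_ifs <;> omega
  · simp only [PySem.List.len] at *
    split_ifs <;> omega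
  · simp only [PySem.List.len] at *
    split_ifs <;> omega

def to_base64_iter (buf : List Int) : List Int :=
  pvLoopA buf 0 0 0 []

-- ===== PORT B =====
-- the inner `while nbits >= 6` loop of B
def pvDrain (acc : Int) (nbits : Nat) (out : List Int) : Nat × List Int :=
  if 6 ≤ nbits then
    pvDrain acc (nbits - 6) (out ++ [PySem.Int.band (acc >>> (nbits - 6)) 63])
  else (nbits, out)
termination_by nbits
decreasing_by omega

-- the body of B's `for byte in buf` loop; state = (acc, nbits, yielded)
def pvStepB (s : Int × Nat × List Int) (byte : Int) : Int × Nat × List Int :=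
  let acc := PySem.Int.bor ((PySem.Int.band s.1 255) <<< (8:Nat)) (PySem.Int.band byte 255)
  let r := pvDrain acc (s.2.1 + 8) s.2.2
  (acc, r.1, r.2)

def to_base64_iter_alt (buf : List Int) : List Int :=
  let s := buf.foldl pvStepB (0, 0, [])
  if 0 < s.2.1 then s.2.2 ++ [PySem.Int.band (s.1 <<< (6 - s.2.1)) 63] else s.2.2

-- ===== PRECONDITION & SPEC =====
def Spec_to_base64_iter (buf : List Int) (out : List Int) : Prop := out = to_base64_iter_alt buf
instance (buf : List Int) (out : List Int) : Decidable (Spec_to_base64_iter buf out) := by unfold Spec_to_base64_iter; infer_instance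

-- ===== CLAIM (what is proved, stated in full; the proofs are below) =====
def Claim_equal_to_base64_iter : Prop := ∀ (buf : List Int), Dom_to_base64_iter buf → Spec_to_base64_iter buf (to_base64_iter buf)

-- ===== LEMMAS AND PROOFS =====

-- the common reference value: the sextet stream, three input bytes at a time
def pvE : List Int → List Int
  | [] => []
  | [a] => [a % 256 / 4, a % 4 * 16]
  | [a, b] => [a % 256 / 4, a % 4 * 16 + b % 256 / 16, b % 16 * 4]
  | a :: b :: c :: l =>
      a % 256 / 4 :: (a % 4 * 16 + b % 256 / 16) :: (b % 16 * 4 + c % 256 / 64) ::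
        c % 64 :: pvE l

-- Nat-level: an AND with a constant below 2^8 only sees the low 8 bits
theorem pv_and_low (n c : Nat) (hc : c < 2 ^ 8) : n &&& c = (n % 2 ^ 8) &&& c := by
  apply Nat.eq_of_testBit_eq
  intro i
  simp only [Nat.testBit_land, Nat.testBit_mod_two_pow]
  by_cases hi : i < 8
  · simp [hi]
  · have hcf : c.testBit i = false :=
      Nat.testBit_lt_two_pow (lt_of_lt_of_le hc (Nat.pow_le_pow_right (by norm_num) (by omega)))
    simp [hi, hcf]

-- the seven mask values A/B use, as arithmetic on Nat
set_option maxRecDepth 8192 in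
theorem pv_nand3 (n : Nat) : n &&& 3 = n % 4 := by
  rw [pv_and_low n 3 (by norm_num), show n % 4 = (n % 2 ^ 8) % 4 from
    (Nat.mod_mod_of_dvd n (by norm_num)).symm]
  have h : n % 2 ^ 8 < 256 := Nat.mod_lt _ (by norm_num)
  revert h; generalize n % 2 ^ 8 = r; revert r; decide
set_option maxRecDepth 8192 in
theorem pv_nand15 (n : Nat) : n &&& 15 = n % 16 := by
  rw [pv_and_low n 15 (by norm_num), show n % 16 = (n % 2 ^ 8) % 16 from
    (Nat.mod_mod_of_dvd n (by norm_num)).symm]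
  have h : n % 2 ^ 8 < 256 := Nat.mod_lt _ (by norm_num)
  revert h; generalize n % 2 ^ 8 = r; revert r; decide
set_option maxRecDepth 8192 in
theorem pv_nand63 (n : Nat) : n &&& 63 = n % 64 := by
  rw [pv_and_low n 63 (by norm_num), show n % 64 = (n % 2 ^ 8) % 64 from
    (Nat.mod_mod_of_dvd n (by norm_num)).symm]
  have h : n % 2 ^ 8 < 256 := Nat.mod_lt _ (by norm_num)
  revert h; generalize n % 2 ^ 8 = r; revert r; decide
set_option maxRecDepth 8192 in
theorem pv_nand255 (n : Nat) : n &&& 255 = n % 256 := by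
  rw [pv_and_low n 255 (by norm_num), show n % 256 = n % 2 ^ 8 from by norm_num]
  have h : n % 2 ^ 8 < 256 := Nat.mod_lt _ (by norm_num)
  revert h; generalize n % 2 ^ 8 = r; revert r; decide
set_option maxRecDepth 8192 in
theorem pv_nand252 (n : Nat) : n &&& 252 = n % 256 - n % 4 := by
  rw [pv_and_low n 252 (by norm_num), show n % 4 = (n % 2 ^ 8) % 4 from
    (Nat.mod_mod_of_dvd n (by norm_num)).symm, show n % 256 = n % 2 ^ 8 from by norm_num]
  have h : n % 2 ^ 8 < 256 := Nat.mod_lt _ (by norm_num)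
  revert h; generalize n % 2 ^ 8 = r; revert r; decide
set_option maxRecDepth 8192 in
theorem pv_nand240 (n : Nat) : n &&& 240 = n % 256 - n % 16 := by
  rw [pv_and_low n 240 (by norm_num), show n % 16 = (n % 2 ^ 8) % 16 from
    (Nat.mod_mod_of_dvd n (by norm_num)).symm, show n % 256 = n % 2 ^ 8 from by norm_num]
  have h : n % 2 ^ 8 < 256 := Nat.mod_lt _ (by norm_num)
  revert h; generalize n % 2 ^ 8 = r; revert r; decide
set_option maxRecDepth 8192 in
theorem pv_nand192 (n : Nat) : n &&& 192 = n % 256 - n % 64 := by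
  rw [pv_and_low n 192 (by norm_num), show n % 64 = (n % 2 ^ 8) % 64 from
    (Nat.mod_mod_of_dvd n (by norm_num)).symm, show n % 256 = n % 2 ^ 8 from by norm_num]
  have h : n % 2 ^ 8 < 256 := Nat.mod_lt _ (by norm_num)
  revert h; generalize n % 2 ^ 8 = r; revert r; decide

-- Int-level mask lemmas (Python & on arbitrary, possibly negative, ints)
theorem pv_band3 (x : Int) : PySem.Int.band x 3 = x % 4 := by
  unfold PySem.Int.band
  split_ifs with h1 h2 h2 <;> try norm_num at h2
  · rw [show ((3:Int).toNat) = 3 from rfl, pv_nand3]; omega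
  · rw [show ((3:Int).toNat) = 3 from rfl, Nat.and_comm, pv_nand3]; omega
theorem pv_band15 (x : Int) : PySem.Int.band x 15 = x % 16 := by
  unfold PySem.Int.band
  split_ifs with h1 h2 h2 <;> try norm_num at h2
  · rw [show ((15:Int).toNat) = 15 from rfl, pv_nand15]; omega
  · rw [show ((15:Int).toNat) = 15 from rfl, Nat.and_comm, pv_nand15]; omega
theorem pv_band63 (x : Int) : PySem.Int.band x 63 = x % 64 := by
  unfold PySem.Int.band
  split_ifs with h1 h2 h2 <;> try norm_num at h2
  · rw [show ((63:Int).toNat) = 63 from rfl, pv_nand63]; omega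
  · rw [show ((63:Int).toNat) = 63 from rfl, Nat.and_comm, pv_nand63]; omega
theorem pv_band255 (x : Int) : PySem.Int.band x 255 = x % 256 := by
  unfold PySem.Int.band
  split_ifs with h1 h2 h2 <;> try norm_num at h2
  · rw [show ((255:Int).toNat) = 255 from rfl, pv_nand255]; omega
  · rw [show ((255:Int).toNat) = 255 from rfl, Nat.and_comm, pv_nand255]; omega
theorem pv_band252 (x : Int) : PySem.Int.band x 252 = x % 256 - x % 4 := by
  unfold PySem.Int.band
  split_ifs with h1 h2 h2 <;> try norm_num at h2
  · rw [show ((252:Int).toNat) = 252 from rfl, pv_nand252]; omega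
  · rw [show ((252:Int).toNat) = 252 from rfl, Nat.and_comm, pv_nand252]; omega
theorem pv_band240 (x : Int) : PySem.Int.band x 240 = x % 256 - x % 16 := by
  unfold PySem.Int.band
  split_ifs with h1 h2 h2 <;> try norm_num at h2
  · rw [show ((240:Int).toNat) = 240 from rfl, pv_nand240]; omega
  · rw [show ((240:Int).toNat) = 240 from rfl, Nat.and_comm, pv_nand240]; omega
theorem pv_band192 (x : Int) : PySem.Int.band x 192 = x % 256 - x % 64 := by
  unfold PySem.Int.band
  split_ifs with h1 h2 h2 <;> try norm_num at h2
  · rw [show ((192:Int).toNat) = 192 from rfl, pv_nand192]; omega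
  · rw [show ((192:Int).toNat) = 192 from rfl, Nat.and_comm, pv_nand192]; omega

-- OR of disjoint pieces is addition
theorem pv_bor_add (k : Nat) (x y : Int) (hx : 0 ≤ x) (hxlt : x < 2 ^ k)
    (hy : 0 ≤ y) (hyd : y % 2 ^ k = 0) : PySem.Int.bor x y = y + x := by
  rw [PySem.Int.bor_of_nonneg hx hy]
  obtain ⟨q, hq⟩ : ((2 : Int) ^ k) ∣ y := Int.dvd_of_emod_eq_zero hyd
  have h2 : (0 : Int) < 2 ^ k := by positivity
  have hq0 : 0 ≤ q := by
    by_contra h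
    push Not at h
    nlinarith
  have hxN : x.toNat < 2 ^ k := by
    have : (x.toNat : Int) < ((2 ^ k : Nat) : Int) := by
      push_cast; rwa [Int.toNat_of_nonneg hx]
    exact_mod_cast this
  have hyN : y.toNat = 2 ^ k * q.toNat := by
    have h5 : (y.toNat : Int) = ((2 ^ k * q.toNat : Nat) : Int) := by
      rw [Int.toNat_of_nonneg hy, hq]; push_cast; rw [Int.toNat_of_nonneg hq0]
    exact_mod_cast h5
  rw [Nat.lor_comm, hyN, ← Nat.two_pow_add_eq_or_of_lt hxN, ← hyN]
  push_cast
  rw [Int.toNat_of_nonneg hy, Int.toNat_of_nonneg hx]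

theorem pv_bor16 (x y : Int) (hx : 0 ≤ x) (hxlt : x < 16) (hy : 0 ≤ y)
    (hyd : y % 16 = 0) : PySem.Int.bor x y = y + x := by
  refine pv_bor_add 4 x y hx ?_ hy ?_ <;> norm_num
  · exact hxlt
  · omega

theorem pv_bor4 (x y : Int) (hx : 0 ≤ x) (hxlt : x < 4) (hy : 0 ≤ y)
    (hyd : y % 4 = 0) : PySem.Int.bor x y = y + x := by
  refine pv_bor_add 2 x y hx ?_ hy ?_ <;> norm_num
  · exact hxlt
  · omega

-- B's accumulator step in arithmetic form
theorem pv_acc_step (acc x : Int) :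
    PySem.Int.bor ((PySem.Int.band acc 255) <<< (8:Nat)) (PySem.Int.band x 255)
      = acc % 256 * 256 + x % 256 := by
  rw [Int.shiftLeft_eq, PySem.Int.bor_comm, pv_band255, pv_band255]
  have h1 : (0 : Int) ≤ x % 256 := by omega
  have h2 : x % 256 < 2 ^ 8 := by omega
  have h3 : (0 : Int) ≤ acc % 256 * 2 ^ 8 := mul_nonneg (by omega) (by positivity)
  have h4 : (acc % 256 * 2 ^ 8) % 2 ^ 8 = 0 := Int.mul_emod_left (acc % 256) (2 ^ 8)
  rw [pv_bor_add 8 (x % 256) (acc % 256 * 2 ^ 8) h1 h2 h3 h4]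
  norm_num

-- pvDrain evaluated on the three nbits values B reaches
theorem pv_drain8 (acc : Int) (out : List Int) :
    pvDrain acc 8 out = (2, out ++ [PySem.Int.band (acc >>> (2:Nat)) 63]) := by
  rw [pvDrain]; norm_num; rw [pvDrain]; norm_num
theorem pv_drain10 (acc : Int) (out : List Int) :
    pvDrain acc 10 out = (4, out ++ [PySem.Int.band (acc >>> (4:Nat)) 63]) := by
  rw [pvDrain]; norm_num; rw [pvDrain]; norm_num
theorem pv_drain12 (acc : Int) (out : List Int) :
    pvDrain acc 12 out = (0, out ++ [PySem.Int.band (acc >>> (6:Nat)) 63,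
      PySem.Int.band (acc >>> (0:Nat)) 63]) := by
  rw [pvDrain]; norm_num; rw [pvDrain]; norm_num; rw [pvDrain]; norm_num

-- dict lookups on the reachable keys
theorem pv_sm0 : PySem.Dict.getD pvSextetMask 0 0 = 252 := rfl
theorem pv_sm2 : PySem.Dict.getD pvSextetMask 2 0 = 240 := rfl
theorem pv_sm4 : PySem.Dict.getD pvSextetMask 4 0 = 192 := rfl
theorem pv_rm0 : PySem.Dict.getD pvRemMask 0 0 = 3 := rfl
theorem pv_rm2 : PySem.Dict.getD pvRemMask 2 0 = 15 := rfl
theorem pv_rm4 : PySem.Dict.getD pvRemMask 4 0 = 63 := rfl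
theorem pv_rs0 : PySem.Dict.getD pvRemShift 0 0 = 4 := rfl
theorem pv_rs2 : PySem.Dict.getD pvRemShift 2 0 = 2 := rfl
theorem pv_rs4 : PySem.Dict.getD pvRemShift 4 0 = 0 := rfl

-- A's loop from a clean state (bits_in_rem = rem = 0) emits pvE of the remaining bytes
theorem pvLoopA_clean (buf : List Int) :
    ∀ l (i : Int) (out : List Int), 0 ≤ i → buf.drop i.toNat = l →
      pvLoopA buf 0 0 i out = out ++ pvE l := by
  intro l
  induction l using pvE.induct with
  | case1 =>
    intro i out hi hdrop
    have hlen := congrArg List.length hdrop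
    simp [List.length_drop] at hlen
    rw [pvLoopA]
    rw [if_neg (by simp only [PySem.List.len]; omega)]
    rw [if_neg (by simp only [PySem.List.len]; omega)]
    rw [if_neg (by simp only [PySem.List.len]; omega)]
    simp [pvE]
  | case2 a =>
    intro i out hi hdrop
    have hlen := congrArg List.length hdrop
    simp [List.length_drop] at hlen
    have hk : i.toNat < buf.length := by omega
    rw [List.drop_eq_getElem_cons hk] at hdrop
    simp only [List.cons.injEq] at hdrop
    obtain ⟨ha, -⟩ := hdrop
    rw [pvLoopA]
    rw [if_pos ⟨by simp only [PySem.List.len]; omega, by norm_num⟩]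
    rw [PySem.List.pyGetD_eq_getElem buf 0 hi (by omega), ha]
    norm_num [pv_sm0, pv_rm0, pv_rs0, PySem.Int.bor_zero, pv_band252, pv_band3,
      Int.shiftRight_eq_div_pow, Int.shiftLeft_eq, show Int.toNat 4 = 4 from rfl,
      show Int.toNat 2 = 2 from rfl]
    rw [show (a % 256 - a % 4) / 4 = a % 256 / 4 from by omega]
    rw [pvLoopA]
    rw [if_neg (by simp only [PySem.List.len]; omega)]
    rw [if_neg (by simp only [PySem.List.len]; omega)]
    rw [if_pos ⟨by simp only [PySem.List.len]; omega, by norm_num⟩]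
    rw [pvLoopA]
    rw [if_neg (by simp only [PySem.List.len]; omega)]
    rw [if_neg (by simp only [PySem.List.len]; omega)]
    rw [if_neg (by simp only [PySem.List.len]; omega)]
    simp [pvE]
  | case3 a b =>
    intro i out hi hdrop
    have hlen := congrArg List.length hdrop
    simp [List.length_drop] at hlen
    have hk : i.toNat < buf.length := by omega
    rw [List.drop_eq_getElem_cons hk] at hdrop
    simp only [List.cons.injEq] at hdrop
    obtain ⟨ha, hrest⟩ := hdrop
    have hk2 : i.toNat + 1 < buf.length := by omega
    rw [List.drop_eq_getElem_cons hk2] at hrest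
    simp only [List.cons.injEq] at hrest
    obtain ⟨hb, -⟩ := hrest
    rw [pvLoopA]
    rw [if_pos ⟨by simp only [PySem.List.len]; omega, by norm_num⟩]
    rw [PySem.List.pyGetD_eq_getElem buf 0 hi (by omega), ha]
    norm_num [pv_sm0, pv_rm0, pv_rs0, PySem.Int.bor_zero, pv_band252, pv_band3,
      Int.shiftRight_eq_div_pow, Int.shiftLeft_eq, show Int.toNat 4 = 4 from rfl,
      show Int.toNat 2 = 2 from rfl]
    rw [pvLoopA]
    rw [if_pos ⟨by simp only [PySem.List.len]; omega, by norm_num⟩]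
    rw [PySem.List.pyGetD_eq_getElem buf 0 (by omega) (by omega)]
    simp only [show (i + 1).toNat = i.toNat + 1 from by omega]
    rw [hb]
    norm_num [pv_sm2, pv_rm2, pv_rs2, pv_band240, pv_band15,
      Int.shiftRight_eq_div_pow, Int.shiftLeft_eq, show Int.toNat 2 = 2 from rfl,
      show Int.toNat 4 = 4 from rfl]
    rw [pv_bor16 _ _ (by omega) (by omega) (by omega) (by omega)]
    rw [pvLoopA]
    rw [if_neg (by simp only [PySem.List.len]; omega)]
    rw [if_neg (by simp only [PySem.List.len]; omega)]
    rw [if_pos ⟨by simp only [PySem.List.len]; omega, by norm_num⟩]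
    rw [pvLoopA]
    rw [if_neg (by simp only [PySem.List.len]; omega)]
    rw [if_neg (by simp only [PySem.List.len]; omega)]
    rw [if_neg (by simp only [PySem.List.len]; omega)]
    rw [show (a % 256 - a % 4) / 4 = a % 256 / 4 from by omega]
    rw [show a % 4 * 16 + (b % 256 - b % 16) / 16 = a % 4 * 16 + b % 256 / 16 from by omega]
    simp [pvE]
  | case4 a b c l IH =>
    intro i out hi hdrop
    have hlen := congrArg List.length hdrop
    simp [List.length_drop] at hlen
    have hk : i.toNat < buf.length := by omega
    rw [List.drop_eq_getElem_cons hk] at hdrop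
    simp only [List.cons.injEq] at hdrop
    obtain ⟨ha, hrest⟩ := hdrop
    have hk2 : i.toNat + 1 < buf.length := by omega
    rw [List.drop_eq_getElem_cons hk2] at hrest
    simp only [List.cons.injEq] at hrest
    obtain ⟨hb, hrest2⟩ := hrest
    have hk3 : i.toNat + 1 + 1 < buf.length := by omega
    rw [List.drop_eq_getElem_cons hk3] at hrest2
    simp only [List.cons.injEq] at hrest2
    obtain ⟨hc, hrest3⟩ := hrest2
    rw [pvLoopA]
    rw [if_pos ⟨by simp only [PySem.List.len]; omega, by norm_num⟩]
    rw [PySem.List.pyGetD_eq_getElem buf 0 hi (by omega), ha]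
    norm_num [pv_sm0, pv_rm0, pv_rs0, PySem.Int.bor_zero, pv_band252, pv_band3,
      Int.shiftRight_eq_div_pow, Int.shiftLeft_eq, show Int.toNat 4 = 4 from rfl,
      show Int.toNat 2 = 2 from rfl]
    rw [pvLoopA]
    rw [if_pos ⟨by simp only [PySem.List.len]; omega, by norm_num⟩]
    rw [PySem.List.pyGetD_eq_getElem buf 0 (by omega) (by omega)]
    simp only [show (i + 1).toNat = i.toNat + 1 from by omega]
    rw [hb]
    norm_num [pv_sm2, pv_rm2, pv_rs2, pv_band240, pv_band15,
      Int.shiftRight_eq_div_pow, Int.shiftLeft_eq, show Int.toNat 2 = 2 from rfl,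
      show Int.toNat 4 = 4 from rfl]
    rw [pv_bor16 _ _ (by omega) (by omega) (by omega) (by omega)]
    rw [pvLoopA]
    rw [if_pos ⟨by simp only [PySem.List.len]; omega, by norm_num⟩]
    rw [PySem.List.pyGetD_eq_getElem buf 0 (by omega) (by omega)]
    simp only [show (i + 1 + 1).toNat = i.toNat + 1 + 1 from by omega]
    rw [hc]
    norm_num [pv_sm4, pv_rm4, pv_rs4, pv_band192, pv_band63,
      Int.shiftRight_eq_div_pow, Int.shiftLeft_eq, show Int.toNat 6 = 6 from rfl,
      show Int.toNat 0 = 0 from rfl]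
    rw [pv_bor4 _ _ (by omega) (by omega) (by omega) (by omega)]
    rw [show (a % 256 - a % 4) / 4 = a % 256 / 4 from by omega]
    rw [show a % 4 * 16 + (b % 256 - b % 16) / 16 = a % 4 * 16 + b % 256 / 16 from by omega]
    rw [show b % 16 * 4 + (c % 256 - c % 64) / 64 = b % 16 * 4 + c % 256 / 64 from by omega]
    rw [pvLoopA]
    rw [if_neg (by simp only [PySem.List.len]; omega)]
    by_cases hlt : i + 1 + 1 + 1 < PySem.List.len buf
    · rw [if_pos ⟨hlt, by norm_num⟩]
      rw [IH (i + 1 + 1 + 1) _ (by omega)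
        (by rw [show (i + 1 + 1 + 1).toNat = i.toNat + 1 + 1 + 1 from by omega]; exact hrest3)]
      simp [pvE]
    · rw [if_neg (fun h => hlt h.1)]
      rw [if_pos ⟨by simp only [PySem.List.len] at *; omega, by norm_num⟩]
      rw [IH (i + 1 + 1 + 1) _ (by omega)
        (by rw [show (i + 1 + 1 + 1).toNat = i.toNat + 1 + 1 + 1 from by omega]; exact hrest3)]
      simp [pvE]

-- pvStepB on the three nbits values B reaches
theorem pv_step1 (acc a : Int) (out : List Int) :
    pvStepB (acc, 0, out) a =
      (acc % 256 * 256 + a % 256, 2, out ++ [(acc % 256 * 256 + a % 256) / 4 % 64]) := by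
  simp only [pvStepB]
  rw [pv_acc_step]
  norm_num [pv_drain8, Int.shiftRight_eq_div_pow, pv_band63]

theorem pv_step2 (acc a : Int) (out : List Int) :
    pvStepB (acc, 2, out) a =
      (acc % 256 * 256 + a % 256, 4, out ++ [(acc % 256 * 256 + a % 256) / 16 % 64]) := by
  simp only [pvStepB]
  rw [pv_acc_step]
  norm_num [pv_drain10, Int.shiftRight_eq_div_pow, pv_band63]

theorem pv_step3 (acc a : Int) (out : List Int) :
    pvStepB (acc, 4, out) a =
      (acc % 256 * 256 + a % 256, 0,
        out ++ [(acc % 256 * 256 + a % 256) / 64 % 64, (acc % 256 * 256 + a % 256) % 64]) := by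
  simp only [pvStepB]
  rw [pv_acc_step]
  norm_num [pv_drain12, Int.shiftRight_eq_div_pow, pv_band63]

-- B's fold from a clean state (nbits = 0) emits pvE of the remaining bytes
theorem pvFoldB :
    ∀ (l : List Int) (acc : Int) (out : List Int),
      (if 0 < (List.foldl pvStepB (acc, (0:Nat), out) l).2.1 then
        (List.foldl pvStepB (acc, (0:Nat), out) l).2.2 ++
          [PySem.Int.band ((List.foldl pvStepB (acc, (0:Nat), out) l).1 <<<
            (6 - (List.foldl pvStepB (acc, (0:Nat), out) l).2.1)) 63]
       else (List.foldl pvStepB (acc, (0:Nat), out) l).2.2)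
        = out ++ pvE l := by
  intro l
  induction l using pvE.induct with
  | case1 =>
    intro acc out
    simp [pvE]
  | case2 a =>
    intro acc out
    simp only [List.foldl_cons, List.foldl_nil, pv_step1]
    norm_num [Int.shiftLeft_eq, pv_band63]
    have e1 : (acc % 256 * 256 + a % 256) / 4 % 64 = a % 256 / 4 := by omega
    have e2 : (acc % 256 * 256 + a % 256) * 16 % 64 = a % 4 * 16 := by omega
    rw [e1, e2]
    simp [pvE]
  | case3 a b =>
    intro acc out
    simp only [List.foldl_cons, List.foldl_nil, pv_step1, pv_step2]
    norm_num [Int.shiftLeft_eq, pv_band63]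
    have e1 : (acc % 256 * 256 + a % 256) / 4 % 64 = a % 256 / 4 := by omega
    have e2 : (a % 256 * 256 + b % 256) / 16 % 64
        = a % 4 * 16 + b % 256 / 16 := by omega
    have e3 : (a % 256 * 256 + b % 256) * 4 % 64
        = b % 16 * 4 := by omega
    rw [e1, e2, e3]
    simp [pvE]
  | case4 a b c l IH =>
    intro acc out
    simp only [List.foldl_cons, pv_step1, pv_step2, pv_step3]
    rw [IH]
    have e1 : (acc % 256 * 256 + a % 256) / 4 % 64 = a % 256 / 4 := by omega
    have e2 : ((acc % 256 * 256 + a % 256) % 256 * 256 + b % 256) / 16 % 64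
        = a % 4 * 16 + b % 256 / 16 := by omega
    have e3 : (((acc % 256 * 256 + a % 256) % 256 * 256 + b % 256) % 256 * 256 + c % 256)
        / 64 % 64 = b % 16 * 4 + c % 256 / 64 := by omega
    have e4 : (((acc % 256 * 256 + a % 256) % 256 * 256 + b % 256) % 256 * 256 + c % 256)
        % 64 = c % 64 := by omega
    rw [e1, e2, e3, e4]
    simp [pvE]

-- ===== VERDICT (by name: the statement is the Claim_ definition above) =====
theorem to_base64_iter_spec : Claim_equal_to_base64_iter := by
  intro buf _
  unfold Spec_to_base64_iter to_base64_iter to_base64_iter_alt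
  rw [pvLoopA_clean buf buf 0 [] le_rfl (by simp)]
  rw [show ([] : List Int) ++ pvE buf = pvE buf from by simp]
  exact (pvFoldB buf 0 []).symm
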